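-- pv_equiv track=rewrite | github.com/enoriega/frailty_graph_viz | db_docker/main.py | prepare_markup
-- ===== SOURCE A (Python) =====
-- def prepare_markup(sentence_tokens, event_indices, controller_indices, controlled_indices, trigger_indices, label):
--     markup = sentence_tokens.copy()
--
--     arr = [(controller_indices[0], f'<span class="controller">'), (controller_indices[1], f'</span>')] + \
--         [(controlled_indices[0], f'<span class="controlled">'), (controlled_indices[1], f'</span>')] + \
--         [(trigger_indices[0], f'<span class="trigger">'), (trigger_indices[1], f'</span>')]
--
--     arr.sort(key=lambda x: x[0])
--     arr = [(event_indices[0], f'<span class="event {label}">')] + arr + [(event_indices[1], f'</span>')]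
--
--     for i in range(len(arr)-1, -1, -1):
--         markup.insert(arr[i][0], arr[i][1])
--
--     return markup
-- ===== SOURCE B (Python) =====
-- def _markup(tags, tokens):
--     """Weave (index, tag) pairs into the token list: the first tag is spliced
--     into the result of weaving the remaining ones."""
--     if not tags:
--         return list(tokens)
--     idx, tag = tags[0]
--     body = _markup(tags[1:], tokens)
--     return body[:idx] + [tag] + body[idx:]
--
--
-- def prepare_markup(sentence_tokens, event_indices, controller_indices, controlled_indices, trigger_indices, label):
--     spans = [(controller_indices, 'controller'),
--              (controlled_indices, 'controlled'),
--              (trigger_indices, 'trigger')]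
--     inner = sorted((pair
--                     for bounds, name in spans
--                     for pair in ((bounds[0], f'<span class="{name}">'),
--                                  (bounds[1], '</span>'))),
--                    key=lambda p: p[0])
--     tags = [(event_indices[0], f'<span class="event {label}">')] + inner + \
--            [(event_indices[1], '</span>')]
--     return _markup(tags, sentence_tokens)
-- ===== Notes on version B (the rewrite author's own statement) =====
-- stated objective: alternative
-- what changed: B replaces A's mutate-a-copy reverse loop of list.insert calls by a pure head-first recursion that splices each tag into the recursively marked-up list via slicing, and builds the six span tags with a comprehension over the named spans instead of hand-written pair lists.
import Mathlib
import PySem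

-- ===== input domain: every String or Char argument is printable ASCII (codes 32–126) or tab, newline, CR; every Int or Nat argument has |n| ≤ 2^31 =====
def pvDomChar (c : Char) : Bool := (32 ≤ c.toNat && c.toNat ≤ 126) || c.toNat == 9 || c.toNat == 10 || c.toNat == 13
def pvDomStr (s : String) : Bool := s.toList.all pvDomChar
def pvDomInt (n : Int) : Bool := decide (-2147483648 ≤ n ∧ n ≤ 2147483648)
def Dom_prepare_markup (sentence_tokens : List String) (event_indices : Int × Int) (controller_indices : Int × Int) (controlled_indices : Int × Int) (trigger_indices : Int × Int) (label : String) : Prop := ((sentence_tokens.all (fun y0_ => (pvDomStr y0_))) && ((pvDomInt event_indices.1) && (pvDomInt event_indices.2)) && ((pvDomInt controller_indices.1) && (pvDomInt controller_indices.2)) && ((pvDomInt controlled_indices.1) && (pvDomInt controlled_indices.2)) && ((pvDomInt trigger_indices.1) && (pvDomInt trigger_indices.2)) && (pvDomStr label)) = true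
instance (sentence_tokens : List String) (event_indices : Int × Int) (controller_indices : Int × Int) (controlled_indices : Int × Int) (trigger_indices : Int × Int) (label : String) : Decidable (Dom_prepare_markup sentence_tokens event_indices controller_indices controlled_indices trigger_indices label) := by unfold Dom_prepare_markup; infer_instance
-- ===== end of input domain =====

-- ===== PORT A =====
-- A: copy tokens, sort the six span tags, wrap with the event tags, then
-- markup.insert(arr[i][0], arr[i][1]) for i from len(arr)-1 down to 0
def pvArrA (event_indices : Int × Int) (controller_indices : Int × Int) (controlled_indices : Int × Int) (trigger_indices : Int × Int) (label : String) : List (Int × String) :=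
  let arr : List (Int × String) :=
    [(controller_indices.1, "<span class=\"controller\">"), (controller_indices.2, "</span>")] ++
    [(controlled_indices.1, "<span class=\"controlled\">"), (controlled_indices.2, "</span>")] ++
    [(trigger_indices.1, "<span class=\"trigger\">"), (trigger_indices.2, "</span>")]
  let arr := PySem.List.sorted arr (fun x => x.1) false
  [(event_indices.1, "<span class=\"event " ++ label ++ "\">")] ++ arr ++ [(event_indices.2, "</span>")]

-- the reverse for-loop of inserts = foldr of PySem.List.insert over arr
def prepare_markup (sentence_tokens : List String) (event_indices : Int × Int) (controller_indices : Int × Int) (controlled_indices : Int × Int) (trigger_indices : Int × Int) (label : String) : List String :=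
  (pvArrA event_indices controller_indices controlled_indices trigger_indices label).foldr
    (fun a markup => PySem.List.insert markup a.1 a.2) sentence_tokens

-- ===== PORT B =====
-- B's _markup: splice the first tag (via Python slices body[:idx] / body[idx:]) into
-- the result of weaving the remaining tags; pure recursion, no mutation
def pvWeave : List (Int × String) → List String → List String
  | [], tokens => tokens
  | (idx, tag) :: rest, tokens =>
    let body := pvWeave rest tokens
    PySem.List.slice body none (some idx) ++ [tag] ++ PySem.List.slice body (some idx) none

def prepare_markup_alt (sentence_tokens : List String) (event_indices : Int × Int) (controller_indices : Int × Int) (controlled_indices : Int × Int) (trigger_indices : Int × Int) (label : String) : List String :=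
  let spans : List ((Int × Int) × String) :=
    [(controller_indices, "controller"), (controlled_indices, "controlled"), (trigger_indices, "trigger")]
  let inner := PySem.List.sorted
    (spans.flatMap (fun s => [(s.1.1, "<span class=\"" ++ s.2 ++ "\">"), (s.1.2, "</span>")]))
    (fun p => p.1) false
  let tags := [(event_indices.1, "<span class=\"event " ++ label ++ "\">")] ++ inner ++ [(event_indices.2, "</span>")]
  pvWeave tags sentence_tokens

-- ===== PRECONDITION & SPEC =====
def Spec_prepare_markup (sentence_tokens : List String) (event_indices : Int × Int) (controller_indices : Int × Int) (controlled_indices : Int × Int) (trigger_indices : Int × Int) (label : String) (out : List String) : Prop := out = prepare_markup_alt sentence_tokens event_indices controller_indices controlled_indices trigger_indices label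
instance (sentence_tokens : List String) (event_indices : Int × Int) (controller_indices : Int × Int) (controlled_indices : Int × Int) (trigger_indices : Int × Int) (label : String) (out : List String) : Decidable (Spec_prepare_markup sentence_tokens event_indices controller_indices controlled_indices trigger_indices label out) := by unfold Spec_prepare_markup; infer_instance

-- ===== CLAIM (what is proved, stated in full; the proofs are below) =====
def Claim_equal_prepare_markup : Prop := ∀ (sentence_tokens : List String) (event_indices : Int × Int) (controller_indices : Int × Int) (controlled_indices : Int × Int) (trigger_indices : Int × Int) (label : String), Dom_prepare_markup sentence_tokens event_indices controller_indices controlled_indices trigger_indices label → Spec_prepare_markup sentence_tokens event_indices controller_indices controlled_indices trigger_indices label (prepare_markup sentence_tokens event_indices controller_indices controlled_indices trigger_indices label)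

-- ===== LEMMAS AND PROOFS =====

-- Python's lst.insert(i, v) equals the splice lst[:i] + [v] + lst[i:] for every Int i
theorem pv_insert_eq_splice (xs : List String) (i : Int) (v : String) :
    PySem.List.insert xs i v =
      PySem.List.slice xs none (some i) ++ [v] ++ PySem.List.slice xs (some i) none := by
  simp [PySem.List.insert, PySem.List.slice, PySem.List.sliceIndices, PySem.List.clampIdx]
  have h : (if i < 0 then max (i + (xs.length : Int)) 0 else min i (xs.length : Int)).toNat
      = (if i < 0 then if ((xs.length : Int) + i) < 0 then 0 else ((xs.length : Int) + i).toNat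
         else min i.toNat xs.length) := by
    split_ifs <;> omega
  rw [← h]
  have h2 : List.take (xs.length - (if i < 0 then max (i + (xs.length : Int)) 0 else min i (xs.length : Int)).toNat)
      (List.drop (if i < 0 then max (i + (xs.length : Int)) 0 else min i (xs.length : Int)).toNat xs)
      = List.drop (if i < 0 then max (i + (xs.length : Int)) 0 else min i (xs.length : Int)).toNat xs :=
    List.take_of_length_le (by simp)
  rw [h2]

-- B's tag list is A's arr
theorem pv_tags_eq (event_indices : Int × Int) (controller_indices : Int × Int) (controlled_indices : Int × Int) (trigger_indices : Int × Int) (label : String) :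
    ([(event_indices.1, "<span class=\"event " ++ label ++ "\">")] ++
      PySem.List.sorted
        (([(controller_indices, "controller"), (controlled_indices, "controlled"), (trigger_indices, "trigger")] : List ((Int × Int) × String)).flatMap
          (fun s => [(s.1.1, "<span class=\"" ++ s.2 ++ "\">"), (s.1.2, "</span>")]))
        (fun p => p.1) false ++ [(event_indices.2, "</span>")]) =
      pvArrA event_indices controller_indices controlled_indices trigger_indices label := by
  rfl

-- the foldr of inserts is the splice recursion
theorem pv_foldr_eq_weave (arr : List (Int × String)) (toks : List String) :
    arr.foldr (fun a markup => PySem.List.insert markup a.1 a.2) toks = pvWeave arr toks := by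
  induction arr with
  | nil => rfl
  | cons a rest ih =>
    obtain ⟨i, t⟩ := a
    show PySem.List.insert (rest.foldr (fun a markup => PySem.List.insert markup a.1 a.2) toks) i t = _
    rw [ih, pv_insert_eq_splice, pvWeave]

-- ===== VERDICT (by name: the statement is the Claim_ definition above) =====
theorem prepare_markup_spec : Claim_equal_prepare_markup := by
  intro sentence_tokens event_indices controller_indices controlled_indices trigger_indices label _
  unfold Spec_prepare_markup prepare_markup prepare_markup_alt
  rw [pv_foldr_eq_weave, ← pv_tags_eq]
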